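-- pv_equiv track=rewrite | github.com/AnatolyPershinov/chess_bigdata | src/lichess_parser.py | moves_to_dict
-- ===== SOURCE A (Python) =====
-- def moves_to_dict(moves):
--     s = moves.split(" ")
--     s = s[:-1]
--
--     # Если последний ход - мат, для него нет оценки позиции (игра окончена)
--     # Поэтому слайсы сдвигаются, время не в той колонке
--     # Чтобы исправить, чуть подправим в конце
--     if len(s) % 8 != 0:
--         s.append(s[-2])
--         s[-3] = "Game Over"
--
--     return {
--         "WhiteMove": s[1::16],
--         "WhiteEval": [i.strip("[]") for i in s[4::16]],
--         "WhiteTime": [i.strip("[]") for i in s[6::16]],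
--
--         "BlackMove": s[9::16],
--         "BlackEval": [i.strip("[]") for i in s[12::16]],
--         "BlackTime": [i.strip("[]") for i in s[14::16]],
--     }
-- ===== SOURCE B (Python) =====
-- def moves_to_dict(moves):
--     s = moves.split(" ")[:-1]
--     # Same checkmate fixup as the original: last move has no eval column.
--     if len(s) % 8 != 0:
--         s.append(s[-2])
--         s[-3] = "Game Over"
--     wm, we, wt, bm, be, bt = [], [], [], [], [], []
--     for i in range(0, len(s), 16):
--         c = s[i:i + 16]
--         n = len(c)
--         if n > 1:
--             wm.append(c[1])
--         if n > 4:
--             we.append(c[4].strip("[]"))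
--         if n > 6:
--             wt.append(c[6].strip("[]"))
--         if n > 9:
--             bm.append(c[9])
--         if n > 12:
--             be.append(c[12].strip("[]"))
--         if n > 14:
--             bt.append(c[14].strip("[]"))
--     return {
--         "WhiteMove": wm,
--         "WhiteEval": we,
--         "WhiteTime": wt,
--         "BlackMove": bm,
--         "BlackEval": be,
--         "BlackTime": bt,
--     }
-- ===== Notes on version B (the rewrite author's own statement) =====
-- stated objective: alternative
-- what changed: B replaces A's six independent strided slices s[k::16] (plus per-list strip comprehensions) by a single chunked pass over blocks of 16 tokens that appends each present field of a chunk to six accumulators.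
import Mathlib
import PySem

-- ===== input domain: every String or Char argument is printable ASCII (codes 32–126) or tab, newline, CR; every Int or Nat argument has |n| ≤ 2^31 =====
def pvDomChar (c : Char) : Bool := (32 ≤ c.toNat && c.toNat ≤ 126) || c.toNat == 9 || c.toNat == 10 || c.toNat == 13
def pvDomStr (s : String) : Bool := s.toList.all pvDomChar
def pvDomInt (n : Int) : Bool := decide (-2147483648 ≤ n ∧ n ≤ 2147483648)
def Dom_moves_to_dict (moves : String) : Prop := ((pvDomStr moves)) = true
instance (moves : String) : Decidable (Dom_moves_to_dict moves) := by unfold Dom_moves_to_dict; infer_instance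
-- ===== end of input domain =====

-- B replaces the six independent strided slices s[k::16] by one chunked pass over
-- blocks of 16 tokens with six accumulators (objective: alternative decomposition).

-- ===== PORT A =====
-- shared prelude of both Pythons: s = moves.split(" ")[:-1] and the checkmate fixup.
-- 'none' encodes the IndexError of s[-2] (raised exactly when len(s) = 1; excluded by Pre_).
-- The item assignment s[-3] = "Game Over" is ported by hand as List.set; exact here,
-- since whenever s[-2] exists, len(s) + 1 ≥ 3, so the index is in range as in Python.
def pyFixup (s : List String) : Option (List String) :=
  if s.length % 8 ≠ 0 then
    match PySem.List.pyGet? s (-2) with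
    | none => none
    | some x => some ((s ++ [x]).set (s.length + 1 - 3) "Game Over")
  else some s

def pyStrip (i : String) : String := PySem.Str.stripChars i "[]"   -- i.strip("[]")

def moves_to_dict (moves : String) : List (String × List String) :=
  let s0 := (PySem.Str.split? moves " ").getD []   -- sep ≠ "", so split? is always some
  match pyFixup (PySem.List.slice s0 none (some (-1))) with
  | none => []   -- IndexError (outside Pre_)
  | some s =>
    [("WhiteMove", (PySem.List.slice? s (some 1) none 16).getD []),
     ("WhiteEval", ((PySem.List.slice? s (some 4) none 16).getD []).map pyStrip),
     ("WhiteTime", ((PySem.List.slice? s (some 6) none 16).getD []).map pyStrip),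
     ("BlackMove", (PySem.List.slice? s (some 9) none 16).getD []),
     ("BlackEval", ((PySem.List.slice? s (some 12) none 16).getD []).map pyStrip),
     ("BlackTime", ((PySem.List.slice? s (some 14) none 16).getD []).map pyStrip)]

-- ===== PORT B =====
-- 'if n > k: acc.append(c[k])' for one chunk c of Source B's loop
def pickB (c : List String) (k : Nat) : List String :=
  match getElem? c k with
  | some x => [x]
  | none => []

-- the chunk loop of Source B: one pass over s in blocks of 16, six accumulators
def chunkLoopB (s : List String) :
    List String × List String × List String × List String × List String × List String :=
  if h : s = [] then ([], [], [], [], [], [])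
  else
    let c := s.take 16
    let (wm, we, wt, bm, be, bt) := chunkLoopB (s.drop 16)
    (pickB c 1 ++ wm,
     (pickB c 4).map pyStrip ++ we,
     (pickB c 6).map pyStrip ++ wt,
     pickB c 9 ++ bm,
     (pickB c 12).map pyStrip ++ be,
     (pickB c 14).map pyStrip ++ bt)
termination_by s.length
decreasing_by simp only [List.length_drop]; have := List.length_pos_iff.mpr h; omega

def moves_to_dict_alt (moves : String) : List (String × List String) :=
  let s0 := (PySem.Str.split? moves " ").getD []
  match pyFixup (PySem.List.slice s0 none (some (-1))) with
  | none => []   -- IndexError (outside Pre_)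
  | some s =>
    let (wm, we, wt, bm, be, bt) := chunkLoopB s
    [("WhiteMove", wm), ("WhiteEval", we), ("WhiteTime", wt),
     ("BlackMove", bm), ("BlackEval", be), ("BlackTime", bt)]

-- ===== PRECONDITION & SPEC =====
-- Pre_ excludes exactly the inputs containing a single space: there s = moves.split(" ")[:-1]
-- has length 1 and both A and B raise IndexError on s[-2] in the checkmate fixup.
def Pre_moves_to_dict (moves : String) : Prop := moves.toList.count ' ' ≠ 1
instance (moves : String) : Decidable (Pre_moves_to_dict moves) := by unfold Pre_moves_to_dict; infer_instance
def pvWitness_moves_to_dict : String := "e4 [0.3] [0:05:00] ok c5 [0.2] [0:04:00] ok "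
def Spec_moves_to_dict (moves : String) (out : List (String × List String)) : Prop := out = moves_to_dict_alt moves
instance (moves : String) (out : List (String × List String)) : Decidable (Spec_moves_to_dict moves out) := by unfold Spec_moves_to_dict; infer_instance

-- ===== CLAIM (what is proved, stated in full; the proofs are below) =====
def Claim_equal_moves_to_dict : Prop := ∀ (moves : String), Dom_moves_to_dict moves → Pre_moves_to_dict moves → Spec_moves_to_dict moves (moves_to_dict moves)

-- ===== LEMMAS AND PROOFS =====

-- the value of one strided slice s[k::16], as a recursion in steps of 16
def stride16 (k : Nat) (s : List String) : List String :=
  if h : k < s.length then s[k] :: stride16 k (s.drop 16) else []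
termination_by s.length
decreasing_by simp; omega

theorem stride16_nil (k : Nat) : stride16 k [] = [] := by unfold stride16; simp

theorem filterMap_range_eq_stride16 (k : Nat) (s : List String) :
    List.filterMap (fun j : Nat => s[k + 16*j]?)
      (List.range (if k < s.length then (s.length - k + 15)/16 else 0)) = stride16 k s := by
  fun_induction stride16 k s with
  | case1 s h ih =>
    have hlen : (s.drop 16).length = s.length - 16 := by simp
    have hc : (if k < s.length then (s.length - k + 15)/16 else 0)
        = (if k < (s.drop 16).length then ((s.drop 16).length - k + 15)/16 else 0) + 1 := by
      rw [hlen]; split_ifs <;> omega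
    rw [hc, List.range_succ_eq_map, List.filterMap_cons]
    have h0 : k + 16*0 = k := by omega
    simp only [h0, List.getElem?_eq_getElem h]
    rw [List.filterMap_map]
    have hf : ((fun j : Nat => s[k + 16*j]?) ∘ Nat.succ) = (fun j : Nat => (s.drop 16)[k + 16*j]?) := by
      funext j
      simp only [Function.comp, List.getElem?_drop]
      congr 1
      omega
    rw [hf, ih]
  | case2 s h =>
    simp [h]

theorem slice?_eq_stride16 (k : Nat) (s : List String) :
    (PySem.List.slice? s (some (k : Int)) none 16).getD [] = stride16 k s := by
  have h16 : (16 : Int) ≠ 0 := by norm_num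
  have hk0 : ¬((k : Int) < 0) := by omega
  simp only [PySem.List.slice?, PySem.List.sliceIndices, h16, if_false]
  norm_num
  simp only [hk0, if_false]
  by_cases h : k < s.length
  · have hmin : min (k : Int) (s.length : Int) = (k : Int) := by omega
    have hlt : (k : Int) < (s.length : Int) := by omega
    rw [hmin]
    simp only [hlt, if_true]
    have hcnt : (((s.length : Int) - k + 16 - 1)/16).toNat = (s.length - k + 15)/16 := by omega
    have hf : (fun j : Nat => s[((k : Int) + 16*(j:Int)).toNat]?) = (fun j : Nat => s[k + 16*j]?) := by
      funext j; congr 1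
    rw [hcnt, hf, show (s.length - k + 15)/16 = (if k < s.length then (s.length - k + 15)/16 else 0) from by simp [h], filterMap_range_eq_stride16 k s]
  · have hmin : min (k : Int) (s.length : Int) = (s.length : Int) := by omega
    rw [hmin]
    simp only [lt_irrefl, if_false]
    rw [stride16]
    simp [h]

theorem stride16_chunk (k : Nat) (hk : k < 16) (s : List String) :
    stride16 k s = pickB (s.take 16) k ++ stride16 k (s.drop 16) := by
  by_cases h : k < s.length
  · rw [stride16]
    simp [h, pickB, hk]
  · have h2 : ¬ k < (s.drop 16).length := by simp; omega
    rw [stride16, stride16]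
    simp [h, pickB]
    omega

theorem chunkLoopB_eq (s : List String) :
    chunkLoopB s = (stride16 1 s, (stride16 4 s).map pyStrip, (stride16 6 s).map pyStrip,
                    stride16 9 s, (stride16 12 s).map pyStrip, (stride16 14 s).map pyStrip) := by
  fun_induction chunkLoopB s with
  | case1 => simp [stride16_nil]
  | case2 s h c wm we wt bm be bt heq ih =>
    rw [heq] at ih
    simp only [Prod.mk.injEq] at ih
    obtain ⟨e1, e2, e3, e4, e5, e6⟩ := ih
    simp only [Prod.mk.injEq]
    refine ⟨?_, ?_, ?_, ?_, ?_, ?_⟩ <;>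
      rw [stride16_chunk _ (by omega) s] <;>
      simp [List.map_append, e1, e2, e3, e4, e5, e6]
    all_goals rfl

theorem stride16_one (s : List String) :
    (PySem.List.slice? s (some 1) none 16).getD [] = stride16 1 s := by
  simpa using slice?_eq_stride16 1 s

theorem stride16_four (s : List String) :
    (PySem.List.slice? s (some 4) none 16).getD [] = stride16 4 s := by
  simpa using slice?_eq_stride16 4 s

theorem stride16_six (s : List String) :
    (PySem.List.slice? s (some 6) none 16).getD [] = stride16 6 s := by
  simpa using slice?_eq_stride16 6 s

theorem stride16_nine (s : List String) :
    (PySem.List.slice? s (some 9) none 16).getD [] = stride16 9 s := by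
  simpa using slice?_eq_stride16 9 s

theorem stride16_twelve (s : List String) :
    (PySem.List.slice? s (some 12) none 16).getD [] = stride16 12 s := by
  simpa using slice?_eq_stride16 12 s

theorem stride16_fourteen (s : List String) :
    (PySem.List.slice? s (some 14) none 16).getD [] = stride16 14 s := by
  simpa using slice?_eq_stride16 14 s

-- ===== VERDICT (by name: the statement is the Claim_ definition above) =====
theorem moves_to_dict_spec : Claim_equal_moves_to_dict := by
  intro moves _ _
  unfold Spec_moves_to_dict moves_to_dict moves_to_dict_alt
  cases hr : pyFixup (PySem.List.slice ((PySem.Str.split? moves " ").getD []) none (some (-1))) with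
  | none => simp [hr]
  | some s =>
    simp [hr, chunkLoopB_eq, stride16_one, stride16_four, stride16_six,
          stride16_nine, stride16_twelve, stride16_fourteen]
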